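-- pv_equiv track=rewrite | github.com/SpiffyJohnson/Flashcards | Flashcards.py | VerifyColumnCount
-- ===== SOURCE A (Python) =====
-- def VerifyColumnCount(array):
--     isValid = True
--     try:
--         targetLineCount = len(array[0])
--         if targetLineCount < 2: isValid = False
--         for line in array:
--             if len(line) != targetLineCount:
--                 isValid = False
--         return isValid
--     except:
--         return False
-- ===== SOURCE B (Python) =====
-- def VerifyColumnCount(array):
--     try:
--         lengths = {len(line) for line in array}
--         return len(lengths) == 1 and lengths.pop() >= 2
--     except:
--         return False
-- ===== Notes on version B (the rewrite author's own statement) =====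
-- stated objective: simpler
-- what changed: Replaces the per-row comparison against the first row's length plus a running boolean with a single set comprehension of all row lengths followed by a uniqueness-and-threshold check.
import Mathlib
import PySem

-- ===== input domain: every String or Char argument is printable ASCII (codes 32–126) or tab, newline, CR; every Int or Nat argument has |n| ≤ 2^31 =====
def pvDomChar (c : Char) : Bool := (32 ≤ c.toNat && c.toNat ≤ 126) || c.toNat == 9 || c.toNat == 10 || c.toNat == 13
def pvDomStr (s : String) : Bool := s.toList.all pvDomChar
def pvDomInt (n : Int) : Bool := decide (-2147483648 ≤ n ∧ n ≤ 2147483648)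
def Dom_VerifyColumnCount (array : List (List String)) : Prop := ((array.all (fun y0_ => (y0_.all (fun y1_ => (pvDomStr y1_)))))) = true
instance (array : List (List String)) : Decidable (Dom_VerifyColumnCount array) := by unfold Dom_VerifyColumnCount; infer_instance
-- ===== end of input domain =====

-- B replaces A's running-boolean comparison against row 0's length with a set of all
-- row lengths checked for uniqueness and threshold (objective: simpler).

-- ===== PORT A =====
-- On [] Python A's array[0] raises IndexError and the except returns False.
def VerifyColumnCount (array : List (List String)) : Bool :=
  match array with
  | [] => false
  | first :: _ =>
    let targetLineCount := first.length
    let isValid := if targetLineCount < 2 then false else true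
    array.foldl (fun v line => if line.length ≠ targetLineCount then false else v) isValid

-- ===== PORT B =====
def VerifyColumnCount_alt (array : List (List String)) : Bool :=
  let lengths : PySem.Set Nat := PySem.Set.ofList (array.map (fun line => line.length))
  lengths.length == 1 && decide (2 ≤ lengths.headD 0)

-- ===== PRECONDITION & SPEC =====
def Spec_VerifyColumnCount (array : List (List String)) (out : Bool) : Prop := out = VerifyColumnCount_alt array
instance (array : List (List String)) (out : Bool) : Decidable (Spec_VerifyColumnCount array out) := by unfold Spec_VerifyColumnCount; infer_instance

-- ===== CLAIM (what is proved, stated in full; the proofs are below) =====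
def Claim_equal_VerifyColumnCount : Prop := ∀ (array : List (List String)), Dom_VerifyColumnCount array → Spec_VerifyColumnCount array (VerifyColumnCount array)

-- ===== LEMMAS AND PROOFS =====

-- A's loop: the running boolean is v ANDed with "every row has the target length".
theorem foldA_eq (l : List (List String)) (t : Nat) (v : Bool) :
    l.foldl (fun v line => if line.length ≠ t then false else v) v
      = (v && l.all (fun line => line.length == t)) := by
  induction l generalizing v with
  | nil => simp
  | cons h tl ih =>
    rw [List.foldl_cons, List.all_cons]
    by_cases hh : h.length = t
    · rw [if_neg (by simp [hh]), ih]
      simp [hh]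
    · rw [if_pos (by simp [hh]), ih]
      simp [hh]

-- Set.add never changes the head of a nonempty set and keeps it nonempty.
theorem foldl_add_head (l : List Nat) (s : List Nat) (hs : s ≠ []) :
    (l.foldl PySem.Set.add s).head? = s.head? ∧ l.foldl PySem.Set.add s ≠ [] := by
  induction l generalizing s with
  | nil => exact ⟨rfl, hs⟩
  | cons x tl ih =>
    simp only [List.foldl_cons]
    have hadd : (PySem.Set.add s x).head? = s.head? ∧ PySem.Set.add s x ≠ [] := by
      unfold PySem.Set.add
      split
      · exact ⟨rfl, hs⟩
      · cases s with
        | nil => exact absurd rfl hs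
        | cons a as => simp
    obtain ⟨h1, h2⟩ := ih (PySem.Set.add s x) hadd.2
    exact ⟨h1.trans hadd.1, h2⟩

-- If every element of l is x, folding Set.add into [x] stays [x].
theorem foldl_add_const (l : List Nat) (x : Nat) (h : ∀ y ∈ l, y = x) :
    l.foldl PySem.Set.add [x] = [x] := by
  induction l with
  | nil => rfl
  | cons a tl ih =>
    have ha : a = x := h a (List.mem_cons_self ..)
    have : PySem.Set.add [x] a = [x] := by
      unfold PySem.Set.add
      simp [ha, PySem.Set.contains]
    simp only [List.foldl_cons, this]
    exact ih (fun y hy => h y (List.mem_cons_of_mem _ hy))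

theorem ofList_cons_head (x : Nat) (l : List Nat) :
    (PySem.Set.ofList (x :: l)).head? = some x := by
  have h0 : PySem.Set.ofList (x :: l) = l.foldl PySem.Set.add [x] := by
    rw [PySem.Set.ofList_eq_foldl]
    rfl
  rw [h0, (foldl_add_head l [x] (by simp)).1]
  rfl

theorem ofList_cons_len_one_iff (x : Nat) (l : List Nat) :
    (PySem.Set.ofList (x :: l)).length = 1 ↔ ∀ y ∈ l, y = x := by
  constructor
  · intro hlen y hy
    have hmem : y ∈ PySem.Set.ofList (x :: l) := by
      rw [PySem.Set.mem_ofList]; exact List.mem_cons_of_mem _ hy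
    have hone : PySem.Set.ofList (x :: l) = [x] := by
      cases hset : PySem.Set.ofList (x :: l) with
      | nil => rw [hset] at hlen; simp at hlen
      | cons a as =>
        have := ofList_cons_head x l
        rw [hset] at this hlen
        simp at this hlen
        simp [this, hlen]
    rw [hone] at hmem
    simpa using hmem
  · intro h
    rw [PySem.Set.ofList_eq_foldl]
    show (l.foldl PySem.Set.add (PySem.Set.add [] x)).length = 1
    have : PySem.Set.add ([] : List Nat) x = [x] := rfl
    rw [this, foldl_add_const l x h]
    rfl

-- ===== VERDICT (by name: the statement is the Claim_ definition above) =====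
theorem VerifyColumnCount_spec : Claim_equal_VerifyColumnCount := by
  intro array _
  unfold Spec_VerifyColumnCount VerifyColumnCount VerifyColumnCount_alt
  cases array with
  | nil => rfl
  | cons first rest =>
    simp only [List.map_cons]
    rw [foldA_eq]
    by_cases hall : ∀ y ∈ rest.map (fun line => line.length), y = first.length
    · have hlen : (PySem.Set.ofList (first.length :: rest.map (fun line => line.length))).length = 1 :=
        (ofList_cons_len_one_iff _ _).mpr hall
      have hhead := ofList_cons_head first.length (rest.map (fun line => line.length))
      have hrest : rest.all (fun line => line.length == first.length) = true := by
        simp only [List.all_eq_true, beq_iff_eq]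
        intro line hline
        exact hall line.length (List.mem_map_of_mem hline)
      have hheadD : (PySem.Set.ofList (first.length :: rest.map (fun line => line.length))).headD 0 = first.length := by
        cases hset : PySem.Set.ofList (first.length :: rest.map (fun line => line.length)) with
        | nil => rw [hset] at hhead; simp at hhead
        | cons a as => rw [hset] at hhead; simp at hhead; simp [hhead]
      simp only [hlen, hheadD, List.all_cons, hrest, beq_self_eq_true, Bool.and_true]
      by_cases h2 : first.length < 2
      · simp [h2]
      · simp [h2]
        omega
    · simp only [not_forall, exists_prop] at hall
      obtain ⟨y, hy, hyne⟩ := hall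
      have hlen : (PySem.Set.ofList (first.length :: rest.map (fun line => line.length))).length ≠ 1 := by
        intro hone
        exact hyne ((ofList_cons_len_one_iff _ _).mp hone y hy)
      have hrest : rest.all (fun line => line.length == first.length) = false := by
        simp only [List.all_eq_false]
        obtain ⟨line, hline, hlineq⟩ := List.mem_map.mp hy
        exact ⟨line, hline, by simp [hlineq, hyne]⟩
      simp [hrest, hlen]
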